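-- pv_equiv track=rewrite | github.com/tharun-extinct/Crack-Droid | forensics_toolkit/attack_engines/dictionary_attack.py | _calculate_pattern_complexity
-- ===== SOURCE A (Python) =====
-- def _calculate_pattern_complexity(pattern: str) -> int:
--     """Calculate pattern complexity penalty"""
--     complexity = 0
--
--     # Character type diversity penalty (very mixed patterns are less common)
--     has_digit = any(c.isdigit() for c in pattern)
--     has_lower = any(c.islower() for c in pattern)
--     has_upper = any(c.isupper() for c in pattern)
--     has_symbol = any(not c.isalnum() for c in pattern)
--
--     char_types = sum([has_digit, has_lower, has_upper, has_symbol])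
--     if char_types > 2:
--         complexity += char_types * 20
--
--     # Length penalty for very long patterns
--     if len(pattern) > 12:
--         complexity += (len(pattern) - 12) * 10
--
--     # Randomness penalty (patterns with high entropy are less likely)
--     if len(set(pattern)) == len(pattern) and len(pattern) > 6:
--         complexity += 30
--
--     return complexity
-- ===== SOURCE B (Python) =====
-- def _category(c: str) -> int:
--     if c.isdigit():
--         return 0
--     if c.islower():
--         return 1
--     if c.isupper():
--         return 2
--     return 3
--
--
-- def _calculate_pattern_complexity(pattern: str) -> int:
--     """Classification-based: count distinct character categories for the
--     type-diversity penalty, and detect repeats by sorting the pattern and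
--     comparing neighbours (instead of boolean scans and a set-cardinality check)."""
--     char_types = len({_category(c) for c in pattern})
--     n = len(pattern)
--     score = char_types * 20 if char_types > 2 else 0
--     if n > 12:
--         score += (n - 12) * 10
--     if n > 6:
--         srt = sorted(pattern)
--         if all(a != b for a, b in zip(srt, srt[1:])):
--             score += 30
--     return score
-- ===== Notes on version B (the rewrite author's own statement) =====
-- stated objective: alternative
-- what changed: Type diversity is computed by classifying each character into one of four category codes and counting the distinct codes (a set of categories) instead of four separate boolean any() scans, and the all-unique test sorts the pattern and compares adjacent neighbours instead of comparing len(set(pattern)) with len(pattern).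
import Mathlib
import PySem

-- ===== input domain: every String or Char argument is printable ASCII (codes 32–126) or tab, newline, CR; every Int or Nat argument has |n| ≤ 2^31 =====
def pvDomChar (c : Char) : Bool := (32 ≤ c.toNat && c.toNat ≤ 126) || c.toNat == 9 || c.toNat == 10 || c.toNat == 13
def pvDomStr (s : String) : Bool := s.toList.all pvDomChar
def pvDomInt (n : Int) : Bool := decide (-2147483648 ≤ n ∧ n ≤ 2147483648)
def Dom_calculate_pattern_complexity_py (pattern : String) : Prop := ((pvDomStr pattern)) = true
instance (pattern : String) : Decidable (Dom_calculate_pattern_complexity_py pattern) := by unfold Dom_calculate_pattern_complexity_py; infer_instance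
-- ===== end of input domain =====

-- B classifies each character into one category code and counts the distinct codes, and tests
-- all-uniqueness by sorting and comparing neighbours (objective: alternative algorithm, same purpose).

-- ===== PORT A =====
-- literal port of A: four any() scans, set(pattern), then the three penalty rules
def calculate_pattern_complexity_py (pattern : String) : Int :=
  let cs := pattern.toList
  let complexity : Int := 0
  let has_digit := cs.any (fun c => PySem.Chars.isdigit c)
  let has_lower := cs.any (fun c => PySem.Chars.islower c)
  let has_upper := cs.any (fun c => PySem.Chars.isupper c)
  let has_symbol := cs.any (fun c => ! PySem.Chars.isalnum c)
  let char_types : Int :=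
    [has_digit, has_lower, has_upper, has_symbol].foldl (fun s b => s + (if b then 1 else 0)) 0
  let complexity := if char_types > 2 then complexity + char_types * 20 else complexity
  let complexity := if (cs.length : Int) > 12 then complexity + ((cs.length : Int) - 12) * 10 else complexity
  let complexity :=
    if (PySem.Set.ofList cs).length = cs.length ∧ (cs.length : Int) > 6 then complexity + 30 else complexity
  complexity

-- ===== PORT B =====
-- B's helper _category: one of four category codes per character
def pvCategory (c : Char) : Int :=
  if PySem.Chars.isdigit c then 0
  else if PySem.Chars.islower c then 1
  else if PySem.Chars.isupper c then 2
  else 3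

def calculate_pattern_complexity_py_alt (pattern : String) : Int :=
  let cs := pattern.toList
  let char_types : Int := (PySem.Set.ofList (cs.map pvCategory)).length
  let n : Int := cs.length
  let score : Int := if char_types > 2 then char_types * 20 else 0
  let score := if n > 12 then score + (n - 12) * 10 else score
  let score :=
    if n > 6 then
      let srt := PySem.List.sorted cs (fun c => c) false
      if (srt.zip srt.tail).all (fun p => !(p.1 == p.2)) then score + 30 else score
    else score
  score

-- ===== PRECONDITION & SPEC =====
def Spec_calculate_pattern_complexity_py (pattern : String) (out : Int) : Prop := out = calculate_pattern_complexity_py_alt pattern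
instance (pattern : String) (out : Int) : Decidable (Spec_calculate_pattern_complexity_py pattern out) := by unfold Spec_calculate_pattern_complexity_py; infer_instance

-- ===== CLAIM (what is proved, stated in full; the proofs are below) =====
def Claim_equal_calculate_pattern_complexity_py : Prop := ∀ (pattern : String), Dom_calculate_pattern_complexity_py pattern → Spec_calculate_pattern_complexity_py pattern (calculate_pattern_complexity_py pattern)

-- ===== LEMMAS AND PROOFS =====

-- digit/lower/upper character classes are pairwise disjoint (used to invert pvCategory)
theorem pvDigitNotLower (c : Char) (h : PySem.Chars.isdigit c = true) :
    PySem.Chars.islower c = false := by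
  simp [PySem.Chars.isdigit, PySem.Chars.islower] at *
  intro h2; exact absurd (le_trans h2 h.2) (by decide)

theorem pvDigitNotUpper (c : Char) (h : PySem.Chars.isdigit c = true) :
    PySem.Chars.isupper c = false := by
  simp [PySem.Chars.isdigit, PySem.Chars.isupper] at *
  intro h2; exact absurd (le_trans h2 h.2) (by decide)

theorem pvLowerNotUpper (c : Char) (h : PySem.Chars.islower c = true) :
    PySem.Chars.isupper c = false := by
  simp [PySem.Chars.islower, PySem.Chars.isupper] at *
  intro _; exact lt_of_lt_of_le (by decide : 'Z' < 'a') h.1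

-- in PySem's (ASCII) model, alnum is exactly digit-or-lower-or-upper
theorem pvAlnumSplit (c : Char) :
    PySem.Chars.isalnum c = (PySem.Chars.isdigit c || PySem.Chars.islower c || PySem.Chars.isupper c) := by
  simp [PySem.Chars.isalnum, PySem.Chars.isdigit, PySem.Chars.islower, PySem.Chars.isupper,
    PySem.Chars.isalpha]
  ac_rfl

-- each category code names exactly one of A's four character classes
theorem pvCategory_eq_zero (c : Char) : pvCategory c = 0 ↔ PySem.Chars.isdigit c = true := by
  unfold pvCategory; split_ifs with h1 h2 h3 <;> simp_all

theorem pvCategory_eq_one (c : Char) : pvCategory c = 1 ↔ PySem.Chars.islower c = true := by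
  unfold pvCategory; split_ifs with h1 h2 h3 <;> simp_all [pvDigitNotLower]

theorem pvCategory_eq_two (c : Char) : pvCategory c = 2 ↔ PySem.Chars.isupper c = true := by
  unfold pvCategory; split_ifs with h1 h2 h3 <;> simp_all [pvDigitNotUpper, pvLowerNotUpper]

theorem pvCategory_eq_three (c : Char) : pvCategory c = 3 ↔ (! PySem.Chars.isalnum c) = true := by
  unfold pvCategory; split_ifs with h1 h2 h3 <;> simp_all [pvAlnumSplit]

-- the number of distinct category codes is A's flag sum
theorem pvSetCat_len (cs : List Char) :
    ((PySem.Set.ofList (cs.map pvCategory)).length : Int) =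
      (if cs.any (fun c => PySem.Chars.isdigit c) then 1 else 0)
      + (if cs.any (fun c => PySem.Chars.islower c) then 1 else 0)
      + (if cs.any (fun c => PySem.Chars.isupper c) then 1 else 0)
      + (if cs.any (fun c => ! PySem.Chars.isalnum c) then 1 else 0) := by
  have hf : ∀ c, pvCategory c = 0 ∨ pvCategory c = 1 ∨ pvCategory c = 2 ∨ pvCategory c = 3 := by
    intro c; unfold pvCategory; split_ifs <;> simp
  set S := PySem.Set.ofList (cs.map pvCategory) with hS
  have hmem : ∀ x, x ∈ S ↔ x ∈ cs.map pvCategory := fun x => PySem.Set.mem_ofList _ _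
  have hperm : S.Perm (([0,1,2,3] : List Int).filter (fun x => decide (x ∈ S))) := by
    rw [List.perm_ext_iff_of_nodup (PySem.Set.nodup_ofList _) (List.Nodup.filter _ (by decide))]
    intro x
    simp only [List.mem_filter, decide_eq_true_iff]
    constructor
    · intro hx
      refine ⟨?_, hx⟩
      rcases List.mem_map.1 ((hmem x).1 hx) with ⟨c, _, rfl⟩
      rcases hf c with h|h|h|h <;> simp [h]
    · exact fun h => h.2
  have h0 : (0:Int) ∈ S ↔ cs.any (fun c => PySem.Chars.isdigit c) = true := by
    rw [hmem]; simp [List.any_eq_true, pvCategory_eq_zero]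
  have h1 : (1:Int) ∈ S ↔ cs.any (fun c => PySem.Chars.islower c) = true := by
    rw [hmem]; simp [List.any_eq_true, pvCategory_eq_one]
  have h2 : (2:Int) ∈ S ↔ cs.any (fun c => PySem.Chars.isupper c) = true := by
    rw [hmem]; simp [List.any_eq_true, pvCategory_eq_two]
  have h3 : (3:Int) ∈ S ↔ cs.any (fun c => ! PySem.Chars.isalnum c) = true := by
    rw [hmem]; simp [List.any_eq_true, pvCategory_eq_three]
  rw [hperm.length_eq]
  simp only [List.filter]
  by_cases a0 : cs.any (fun c => PySem.Chars.isdigit c) = true <;>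
    by_cases a1 : cs.any (fun c => PySem.Chars.islower c) = true <;>
    by_cases a2 : cs.any (fun c => PySem.Chars.isupper c) = true <;>
    by_cases a3 : cs.any (fun c => ! PySem.Chars.isalnum c) = true <;>
    simp [h0, h1, h2, h3, a0, a1, a2, a3]

-- A's set-cardinality test says exactly: no repeated character
theorem pvOfList_len_iff (cs : List Char) :
    (PySem.Set.ofList cs).length = cs.length ↔ cs.Nodup := by
  have hp : (PySem.Set.ofList cs).Perm cs.dedup :=
    (List.perm_ext_iff_of_nodup (PySem.Set.nodup_ofList cs) (List.nodup_dedup cs)).2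
      (fun x => by simp [PySem.Set.mem_ofList, List.mem_dedup])
  rw [hp.length_eq]
  constructor
  · intro h
    exact List.dedup_eq_self.1 ((List.dedup_sublist cs).eq_of_length h)
  · intro h
    rw [List.dedup_eq_self.2 h]

-- a ≤-sorted list is duplicate-free iff no two neighbours are equal
theorem pvAdj (l : List Char) (hp : l.Pairwise (· ≤ ·)) :
    ((l.zip l.tail).all (fun p => !(p.1 == p.2))) = true ↔ l.Nodup := by
  induction l with
  | nil => simp
  | cons a t ih =>
    cases t with
    | nil => simp
    | cons b u =>
      rcases List.pairwise_cons.1 hp with ⟨hab, hp'⟩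
      have hrest := ih hp'
      rcases List.pairwise_cons.1 hp' with ⟨hbu, _⟩
      constructor
      · intro h
        simp only [List.tail_cons, List.zip_cons_cons, List.all_cons, Bool.and_eq_true,
          Bool.not_eq_true', beq_eq_false_iff_ne, ne_eq] at h
        obtain ⟨hne, hr⟩ := h
        have hnd : (b :: u).Nodup := hrest.1 (by simpa using hr)
        refine List.nodup_cons.2 ⟨?_, hnd⟩
        intro hmem
        have hlt : a < b := lt_of_le_of_ne (hab b (List.mem_cons_self ..)) hne
        rcases List.mem_cons.1 hmem with h | h
        · exact hne h
        · exact absurd hlt (not_lt.2 (hbu a h))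
      · intro hnd
        rcases List.nodup_cons.1 hnd with ⟨hnm, hnd'⟩
        simp only [List.tail_cons, List.zip_cons_cons, List.all_cons, Bool.and_eq_true,
          Bool.not_eq_true', beq_eq_false_iff_ne, ne_eq]
        refine ⟨fun h => hnm (by simp [h]), ?_⟩
        simpa using hrest.2 hnd'

-- B's sorted-neighbour test says the same
theorem pvZipAll_iff (cs : List Char) :
    (((PySem.List.sorted cs (fun c => c) false).zip
        (PySem.List.sorted cs (fun c => c) false).tail).all (fun p => !(p.1 == p.2))) = true
      ↔ cs.Nodup := by
  rw [pvAdj _ (PySem.List.sorted_pairwise cs (fun c => c))]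
  exact (PySem.List.sorted_perm cs (fun c => c) false).nodup_iff

-- ===== VERDICT (by name: the statement is the Claim_ definition above) =====
theorem calculate_pattern_complexity_py_spec : Claim_equal_calculate_pattern_complexity_py := by
  intro pattern _
  unfold Spec_calculate_pattern_complexity_py
  unfold calculate_pattern_complexity_py calculate_pattern_complexity_py_alt
  simp only [List.foldl, zero_add]
  set cs := pattern.toList with hcs
  rw [pvSetCat_len cs]
  simp only [pvOfList_len_iff, pvZipAll_iff]
  by_cases h6 : (cs.length : Int) > 6 <;> by_cases hnd : cs.Nodup <;>
    simp [h6, hnd]
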